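-- pv_equiv track=rewrite | github.com/fredporter/uDOS-vibe | core/commands/play_handler.py | _profile_context
-- ===== SOURCE A (Python) =====
-- from typing import Dict, List
--
-- def _profile_context(params: List[str]) -> tuple[str | None, str | None]:
--     group_id: str | None = None
--     session_id: str | None = None
--     index = 0
--     while index < len(params):
--         token = str(params[index]).strip().lower()
--         if token in {"--group", "group"}:
--             if index + 1 < len(params):
--                 group_id = str(params[index + 1]).strip()
--                 index += 2
--                 continue
--             break
--         if token in {"--session", "session"}:
--             if index + 1 < len(params):
--                 session_id = str(params[index + 1]).strip()
--                 index += 2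
--                 continue
--             break
--         index += 1
--     return group_id, session_id
-- ===== SOURCE B (Python) =====
-- def _step(state, raw):
--     """Pure Mealy-machine transition: state = (found dict, pending flag name)."""
--     found, pending = state
--     if pending is not None:
--         return ({**found, pending: str(raw).strip()}, None)
--     key = str(raw).strip().lower()
--     if key in ("--group", "group"):
--         return (found, "group")
--     if key in ("--session", "session"):
--         return (found, "session")
--     return state
--
-- def _profile_context(params):
--     state = ({}, None)
--     for raw in params:
--         state = _step(state, raw)
--     found, _pending = state
--     return found.get("group"), found.get("session")
-- ===== Notes on version B (the rewrite author's own statement) =====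
-- stated objective: alternative
-- what changed: A's index loop with lookahead (index+=2 to consume each flag's value) is replaced by a Mealy state machine: a fold of a pure transition function over the tokens whose state is a dict of found values plus a pending-flag marker, with the two results read from the dict at the end; no token is ever looked ahead or skipped.
import Mathlib
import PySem

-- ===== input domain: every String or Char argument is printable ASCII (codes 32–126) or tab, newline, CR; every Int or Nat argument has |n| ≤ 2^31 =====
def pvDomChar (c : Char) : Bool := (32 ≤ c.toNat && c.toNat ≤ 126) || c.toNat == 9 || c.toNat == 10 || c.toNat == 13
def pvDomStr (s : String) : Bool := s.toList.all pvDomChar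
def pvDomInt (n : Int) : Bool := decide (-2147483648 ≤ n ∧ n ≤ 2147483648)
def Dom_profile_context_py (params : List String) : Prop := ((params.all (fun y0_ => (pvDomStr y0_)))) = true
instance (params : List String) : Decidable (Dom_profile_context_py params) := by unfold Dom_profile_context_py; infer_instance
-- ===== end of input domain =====

-- B replaces A's index loop with lookahead (index += 2 consuming each flag's value) by a
-- Mealy state machine: a fold of a pure step over the tokens with state (found-dict, pending flag),
-- results read from the dict at the end; objective: alternative.

-- ===== PORT A =====
-- A's while loop over an index that advances by 1 or 2; index stays in range so getD "" is exact.
def profileLoopA (params : List String) (g s : Option String) (index : Nat) :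
    Option String × Option String :=
  if index < params.length then
    let token := PySem.Str.lower (PySem.Str.strip (params.getD index ""))
    if token = "--group" ∨ token = "group" then
      if index + 1 < params.length then
        profileLoopA params (some (PySem.Str.strip (params.getD (index + 1) ""))) s (index + 2)
      else (g, s)
    else if token = "--session" ∨ token = "session" then
      if index + 1 < params.length then
        profileLoopA params g (some (PySem.Str.strip (params.getD (index + 1) ""))) (index + 2)
      else (g, s)
    else profileLoopA params g s (index + 1)
  else (g, s)
termination_by params.length - index
decreasing_by all_goals omega

def profile_context_py (params : List String) : Option String × Option String :=
  profileLoopA params none none 0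

-- ===== PORT B =====
-- Source B's pure transition _step: state = (found dict, pending flag name)
def profileStepB (st : PySem.Dict String String × Option String) (raw : String) :
    PySem.Dict String String × Option String :=
  match st.2 with
  | some pending => (st.1.insert pending (PySem.Str.strip raw), none)
  | none =>
    let key := PySem.Str.lower (PySem.Str.strip raw)
    if key = "--group" ∨ key = "group" then (st.1, some "group")
    else if key = "--session" ∨ key = "session" then (st.1, some "session")
    else st

-- Source B's for-loop folding _step over params, then the two dict lookups
def profile_context_py_alt (params : List String) : Option String × Option String :=
  let st := params.foldl profileStepB (PySem.Dict.empty, none)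
  (st.1.get? "group", st.1.get? "session")

-- ===== PRECONDITION & SPEC =====
def Spec_profile_context_py (params : List String) (out : Option String × Option String) : Prop := out = profile_context_py_alt params
instance (params : List String) (out : Option String × Option String) : Decidable (Spec_profile_context_py params out) := by unfold Spec_profile_context_py; infer_instance

-- ===== CLAIM =====
def Claim_equal_profile_context_py : Prop := ∀ (params : List String), Dom_profile_context_py params → Spec_profile_context_py params (profile_context_py params)

-- ===== LEMMAS AND PROOFS =====

-- proof-side bridge: lookahead recursion on the remaining list (neither port uses it)
def profileLoopH (g s : Option String) : List String → Option String × Option String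
  | [] => (g, s)
  | token :: rest =>
    let key := PySem.Str.lower (PySem.Str.strip token)
    if key = "--group" ∨ key = "group" then
      match rest with
      | [] => (g, s)
      | v :: rest' => profileLoopH (some (PySem.Str.strip v)) s rest'
    else if key = "--session" ∨ key = "session" then
      match rest with
      | [] => (g, s)
      | v :: rest' => profileLoopH g (some (PySem.Str.strip v)) rest'
    else profileLoopH g s rest

theorem profileLoopH_cons (g s : Option String) (t : String) (rest : List String) :
    profileLoopH g s (t :: rest) =
      (if PySem.Str.lower (PySem.Str.strip t) = "--group" ∨ PySem.Str.lower (PySem.Str.strip t) = "group" then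
        match rest with
        | [] => (g, s)
        | v :: rest' => profileLoopH (some (PySem.Str.strip v)) s rest'
      else if PySem.Str.lower (PySem.Str.strip t) = "--session" ∨ PySem.Str.lower (PySem.Str.strip t) = "session" then
        match rest with
        | [] => (g, s)
        | v :: rest' => profileLoopH g (some (PySem.Str.strip v)) rest'
      else profileLoopH g s rest) := by
  cases rest <;> rfl

theorem profileLoopA_eq_H (params : List String) (g s : Option String) (index : Nat) :
    profileLoopA params g s index = profileLoopH g s (params.drop index) := by
  induction hn : params.length - index using Nat.strong_induction_on
    generalizing g s index with
  | _ n ih =>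
  rw [profileLoopA]
  by_cases h : index < params.length
  · rw [if_pos h, List.drop_eq_getElem_cons h, profileLoopH_cons]
    rw [List.getD_eq_getElem _ _ h]
    set key := PySem.Str.lower (PySem.Str.strip params[index]) with hkey
    by_cases hg : key = "--group" ∨ key = "group"
    · rw [if_pos hg, if_pos hg]
      by_cases h1 : index + 1 < params.length
      · rw [if_pos h1, List.drop_eq_getElem_cons h1, List.getD_eq_getElem _ _ h1]
        exact ih (params.length - (index + 2)) (by omega) _ _ _ rfl
      · rw [if_neg h1, List.drop_eq_nil_of_le (by omega : params.length ≤ index + 1)]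
    · rw [if_neg hg, if_neg hg]
      by_cases hs : key = "--session" ∨ key = "session"
      · rw [if_pos hs, if_pos hs]
        by_cases h1 : index + 1 < params.length
        · rw [if_pos h1, List.drop_eq_getElem_cons h1, List.getD_eq_getElem _ _ h1]
          exact ih (params.length - (index + 2)) (by omega) _ _ _ rfl
        · rw [if_neg h1, List.drop_eq_nil_of_le (by omega : params.length ≤ index + 1)]
      · rw [if_neg hs, if_neg hs]
        exact ih (params.length - (index + 1)) (by omega) _ _ _ rfl
  · rw [if_neg h, List.drop_eq_nil_of_le (by omega : params.length ≤ index), profileLoopH]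

-- step equations for Source B's transition
theorem stepB_pending (d : PySem.Dict String String) (p raw : String) :
    profileStepB (d, some p) raw = (d.insert p (PySem.Str.strip raw), none) := rfl

theorem stepB_none (d : PySem.Dict String String) (raw : String) :
    profileStepB (d, none) raw =
      (if PySem.Str.lower (PySem.Str.strip raw) = "--group" ∨ PySem.Str.lower (PySem.Str.strip raw) = "group" then (d, some "group")
       else if PySem.Str.lower (PySem.Str.strip raw) = "--session" ∨ PySem.Str.lower (PySem.Str.strip raw) = "session" then (d, some "session")
       else (d, none)) := rfl

-- the fold from a (d, none) state computes exactly the lookahead recursion seeded with d's entries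
theorem foldB_eq_H (l : List String) (d : PySem.Dict String String) :
    ((l.foldl profileStepB (d, none)).1.get? "group", (l.foldl profileStepB (d, none)).1.get? "session")
      = profileLoopH (d.get? "group") (d.get? "session") l := by
  induction hn : l.length using Nat.strong_induction_on generalizing l d with
  | _ n ih =>
  match l with
  | [] => rfl
  | t :: rest =>
    rw [profileLoopH_cons]
    simp only [List.foldl_cons, stepB_none]
    by_cases hg : PySem.Str.lower (PySem.Str.strip t) = "--group" ∨ PySem.Str.lower (PySem.Str.strip t) = "group"
    · rw [if_pos hg, if_pos hg]
      match rest with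
      | [] => rfl
      | v :: rest' =>
        simp only [List.foldl_cons, stepB_pending]
        rw [ih rest'.length (by simp at hn; omega) rest' _ rfl]
        rw [PySem.Dict.get?_insert_self, PySem.Dict.get?_insert_of_ne _ _ (by decide)]
    · rw [if_neg hg, if_neg hg]
      by_cases hs : PySem.Str.lower (PySem.Str.strip t) = "--session" ∨ PySem.Str.lower (PySem.Str.strip t) = "session"
      · rw [if_pos hs, if_pos hs]
        match rest with
        | [] => rfl
        | v :: rest' =>
          simp only [List.foldl_cons, stepB_pending]
          rw [ih rest'.length (by simp at hn; omega) rest' _ rfl]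
          rw [PySem.Dict.get?_insert_self, PySem.Dict.get?_insert_of_ne _ _ (by decide)]
      · rw [if_neg hs, if_neg hs]
        exact ih rest.length (by simp at hn; omega) rest d rfl

-- ===== VERDICT =====
theorem profile_context_py_spec : Claim_equal_profile_context_py := by
  intro params _
  unfold Spec_profile_context_py profile_context_py profile_context_py_alt
  show _ = ((params.foldl profileStepB (PySem.Dict.empty, none)).1.get? "group", (params.foldl profileStepB (PySem.Dict.empty, none)).1.get? "session")
  rw [foldB_eq_H params PySem.Dict.empty]
  simpa using profileLoopA_eq_H params none none 0
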